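-- pv_equiv track=rewrite | github.com/yubo-ruan/brain-robot | brain_robot/planning/prompts.py | parse_object_description
-- ===== SOURCE A (Python) =====
-- def parse_object_description(obj_id: str) -> str:
--     """Parse LIBERO object ID into human-readable description.
--
--     Examples:
--         "akita_black_bowl_1_main" → "black bowl"
--         "plate_1_main" → "plate"
--         "glazed_rim_porcelain_ramekin_1_main" → "porcelain ramekin"
--         "wooden_cabinet_1_base" → "wooden cabinet"
--     """
--     # Remove common suffixes
--     name = obj_id.lower()
--     for suffix in ["_main", "_base", "_top", "_middle", "_bottom"]:
--         name = name.replace(suffix, "")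
--
--     # Remove trailing numbers
--     parts = name.split("_")
--     if parts and parts[-1].isdigit():
--         parts = parts[:-1]
--
--     # Known object types
--     OBJECT_TYPES = ["bowl", "plate", "mug", "cup", "drawer", "cabinet", "box", "can", "bottle", "ramekin", "cookies", "stove", "burner"]
--     COLORS = ["black", "white", "red", "blue", "green", "yellow", "brown"]
--     MATERIALS = ["wooden", "metal", "plastic", "glass", "ceramic", "porcelain", "glazed"]
--     IGNORE = ["akita", "rim", "flat"]  # Brand names or non-descriptive
--
--     obj_type = None
--     color = None
--     material = None
--
--     for part in parts:
--         if part in OBJECT_TYPES: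
--             obj_type = part
--         elif part in COLORS:
--             color = part
--         elif part in MATERIALS:
--             material = part
--         elif part in IGNORE:
--             continue
--
--     # Build description
--     desc_parts = []
--     if color:
--         desc_parts.append(color)
--     if material:
--         desc_parts.append(material)
--     if obj_type:
--         desc_parts.append(obj_type)
--
--     if desc_parts:
--         return " ".join(desc_parts)
--
--     # Fallback: use cleaned name
--     return " ".join(p for p in parts if p not in IGNORE)
-- ===== SOURCE B (Python) =====
-- def parse_object_description(obj_id: str) -> str:
--     """Parse LIBERO object ID into a human-readable description.
--
--     Same normalization as the original; the single elif classification loop is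
--     replaced by three independent last-match scans over the parts.
--     """
--     name = obj_id.lower()
--     for suffix in ["_main", "_base", "_top", "_middle", "_bottom"]:
--         name = name.replace(suffix, "")
--     parts = name.split("_")
--     if parts and parts[-1].isdigit():
--         parts = parts[:-1]
--
--     OBJECT_TYPES = ["bowl", "plate", "mug", "cup", "drawer", "cabinet", "box", "can", "bottle", "ramekin", "cookies", "stove", "burner"]
--     COLORS = ["black", "white", "red", "blue", "green", "yellow", "brown"]
--     MATERIALS = ["wooden", "metal", "plastic", "glass", "ceramic", "porcelain", "glazed"]
--     IGNORE = ["akita", "rim", "flat"]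
--
--     color = next((p for p in reversed(parts) if p in COLORS), None)
--     material = next((p for p in reversed(parts) if p in MATERIALS), None)
--     obj_type = next((p for p in reversed(parts) if p in OBJECT_TYPES), None)
--
--     desc_parts = [p for p in (color, material, obj_type) if p]
--     if desc_parts:
--         return " ".join(desc_parts)
--     return " ".join(p for p in parts if p not in IGNORE)
-- ===== Notes on version B (the rewrite author's own statement) =====
-- stated objective: simpler
-- what changed: The single stateful elif classification loop is replaced by three independent last-match scans (next over reversed(parts)) for color, material and object type; normalization and the fallback join are kept.
import Mathlib
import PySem

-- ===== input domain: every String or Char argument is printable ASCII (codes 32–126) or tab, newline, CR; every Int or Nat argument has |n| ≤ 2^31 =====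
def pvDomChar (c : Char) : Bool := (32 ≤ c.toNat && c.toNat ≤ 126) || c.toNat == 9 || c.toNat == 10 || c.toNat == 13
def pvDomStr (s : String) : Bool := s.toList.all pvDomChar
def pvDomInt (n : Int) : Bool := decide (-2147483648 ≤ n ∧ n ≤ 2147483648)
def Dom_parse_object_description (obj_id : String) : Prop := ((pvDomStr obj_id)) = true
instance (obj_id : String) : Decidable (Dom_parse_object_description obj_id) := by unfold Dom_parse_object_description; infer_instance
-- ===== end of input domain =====

-- B replaces the single stateful elif classification loop with three independent
-- last-match scans over the parts (simpler decomposition; same cost).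

-- Module constants shared by both ports (identical literals in both Pythons)
def podOBJECT_TYPES : List String := ["bowl", "plate", "mug", "cup", "drawer", "cabinet", "box", "can", "bottle", "ramekin", "cookies", "stove", "burner"]
def podCOLORS : List String := ["black", "white", "red", "blue", "green", "yellow", "brown"]
def podMATERIALS : List String := ["wooden", "metal", "plastic", "glass", "ceramic", "porcelain", "glazed"]
def podIGNORE : List String := ["akita", "rim", "flat"]

-- Normalization (identical code in both Pythons): lowercase, strip each suffix
-- with replace-all, split on "_", drop the last part if it .isdigit()
def podNorm (obj_id : String) : List String :=
  let name := ["_main", "_base", "_top", "_middle", "_bottom"].foldl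
    (fun n suffix => PySem.Str.replace n suffix "") (PySem.Str.lower obj_id)
  -- sep "_" is a nonempty literal, so split? is always some; getD is never hit
  let parts := (PySem.Str.split? name "_").getD []
  if parts ≠ [] ∧ (match parts.getLast? with
      | some l => PySem.Str.strIsdigit l
      | none => false) = true then
    PySem.List.slice parts none (some (-1))
  else parts

-- ===== PORT A =====
-- one pass with an if/elif chain, last assignment wins
def podStep (s : Option String × Option String × Option String) (p : String) :
    Option String × Option String × Option String :=
  if podOBJECT_TYPES.contains p then (some p, s.2.1, s.2.2)
  else if podCOLORS.contains p then (s.1, some p, s.2.2)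
  else if podMATERIALS.contains p then (s.1, s.2.1, some p)
  else if podIGNORE.contains p then s  -- 'continue'
  else s

-- 'if v: desc_parts.append(v)' — Python truthiness: None and "" are falsy
def podPush (acc : List String) (o : Option String) : List String :=
  match o with
  | some s => if s ≠ "" then acc ++ [s] else acc
  | none => acc

def podA_finish (parts : List String) : String :=
  let s := parts.foldl podStep (none, none, none)
  let desc := podPush (podPush (podPush [] s.2.1) s.2.2) s.1
  if desc ≠ [] then PySem.Str.join " " desc
  else PySem.Str.join " " (parts.filter (fun p => !(podIGNORE.contains p)))

def parse_object_description (obj_id : String) : String :=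
  podA_finish (podNorm obj_id)

-- ===== PORT B =====
def podB_finish (parts : List String) : String :=
  let color := parts.reverse.find? (fun p => podCOLORS.contains p)
  let material := parts.reverse.find? (fun p => podMATERIALS.contains p)
  let obj_type := parts.reverse.find? (fun p => podOBJECT_TYPES.contains p)
  let desc := [color, material, obj_type].filterMap
    (fun o => match o with
      | some s => if s ≠ "" then some s else none
      | none => none)
  if desc ≠ [] then PySem.Str.join " " desc
  else PySem.Str.join " " (parts.filter (fun p => !(podIGNORE.contains p)))

def parse_object_description_alt (obj_id : String) : String :=
  podB_finish (podNorm obj_id)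

-- ===== PRECONDITION & SPEC =====
def Spec_parse_object_description (obj_id : String) (out : String) : Prop := out = parse_object_description_alt obj_id
instance (obj_id : String) (out : String) : Decidable (Spec_parse_object_description obj_id out) := by unfold Spec_parse_object_description; infer_instance

-- ===== CLAIM (what is proved, stated in full; the proofs are below) =====
def Claim_equal_parse_object_description : Prop := ∀ (obj_id : String), Dom_parse_object_description obj_id → Spec_parse_object_description obj_id (parse_object_description obj_id)

-- ===== LEMMAS AND PROOFS =====

theorem pod_T_ne_C (p : String) (h : p ∈ podOBJECT_TYPES) :
    p ∉ podCOLORS := by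
  fin_cases h <;> decide

theorem pod_T_ne_M (p : String) (h : p ∈ podOBJECT_TYPES) :
    p ∉ podMATERIALS := by
  fin_cases h <;> decide

theorem pod_C_ne_M (p : String) (h : p ∈ podCOLORS) :
    p ∉ podMATERIALS := by
  fin_cases h <;> decide

theorem pod_T_ne_empty (p : String) (h : p ∈ podOBJECT_TYPES) : p ≠ "" := by
  fin_cases h <;> decide

theorem pod_C_ne_empty (p : String) (h : p ∈ podCOLORS) : p ≠ "" := by
  fin_cases h <;> decide

theorem pod_M_ne_empty (p : String) (h : p ∈ podMATERIALS) : p ≠ "" := by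
  fin_cases h <;> decide

-- A's fold computes, per category, the last matching part = first match in reverse
theorem podFold_eq (xs : List String) :
    ∀ t c m, xs.foldl podStep (t, c, m) =
      ((xs.reverse.find? (fun p => podOBJECT_TYPES.contains p)).or t,
       (xs.reverse.find? (fun p => podCOLORS.contains p)).or c,
       (xs.reverse.find? (fun p => podMATERIALS.contains p)).or m) := by
  induction xs with
  | nil => intro t c m; simp
  | cons x xs ih =>
    intro t c m
    simp only [List.foldl_cons, List.reverse_cons, List.find?_append]
    by_cases hT : x ∈ podOBJECT_TYPES
    · have hC := pod_T_ne_C x hT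
      have hM := pod_T_ne_M x hT
      simp [podStep, hT, hC, hM, ih]
    · by_cases hC : x ∈ podCOLORS
      · have hM := pod_C_ne_M x hC
        simp [podStep, hT, hC, hM, ih]
      · by_cases hM : x ∈ podMATERIALS
        · simp [podStep, hT, hC, hM, ih]
        · by_cases hI : x ∈ podIGNORE <;>
            simp [podStep, hT, hC, hM, hI, ih]

theorem podFinish_eq (parts : List String) : podA_finish parts = podB_finish parts := by
  simp only [podA_finish, podB_finish, podFold_eq, Option.or_none]
  cases hT : parts.reverse.find? (fun p => podOBJECT_TYPES.contains p) with
  | none =>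
    cases hC : parts.reverse.find? (fun p => podCOLORS.contains p) with
    | none =>
      cases hM : parts.reverse.find? (fun p => podMATERIALS.contains p) with
      | none => simp [podPush]
      | some m => simp [podPush, pod_M_ne_empty m (by simpa using List.find?_some hM)]
    | some c =>
      cases hM : parts.reverse.find? (fun p => podMATERIALS.contains p) with
      | none => simp [podPush, pod_C_ne_empty c (by simpa using List.find?_some hC)]
      | some m => simp [podPush, pod_C_ne_empty c (by simpa using List.find?_some hC),
          pod_M_ne_empty m (by simpa using List.find?_some hM)]
  | some t =>
    cases hC : parts.reverse.find? (fun p => podCOLORS.contains p) with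
    | none =>
      cases hM : parts.reverse.find? (fun p => podMATERIALS.contains p) with
      | none => simp [podPush, pod_T_ne_empty t (by simpa using List.find?_some hT)]
      | some m => simp [podPush, pod_T_ne_empty t (by simpa using List.find?_some hT),
          pod_M_ne_empty m (by simpa using List.find?_some hM)]
    | some c =>
      cases hM : parts.reverse.find? (fun p => podMATERIALS.contains p) with
      | none => simp [podPush, pod_T_ne_empty t (by simpa using List.find?_some hT),
          pod_C_ne_empty c (by simpa using List.find?_some hC)]
      | some m => simp [podPush, pod_T_ne_empty t (by simpa using List.find?_some hT),
          pod_C_ne_empty c (by simpa using List.find?_some hC),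
          pod_M_ne_empty m (by simpa using List.find?_some hM)]

theorem parse_object_description_spec : Claim_equal_parse_object_description := by
  intro obj_id _
  unfold Spec_parse_object_description parse_object_description parse_object_description_alt
  exact podFinish_eq _
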